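-- pv_equiv track=rewrite | github.com/leiacf/AoC2017 | src/09.py | count
-- ===== SOURCE A (Python) =====
-- def remove(line, garbage):
--
--     while "!" in line:
--         start = line.index("!")
--         end = start+1
--         line = line[:start] + line[end+1:]
--
--     while "<" in line:
--         start = line.index("<")
--         end = line.index(">", start)
--
--         garbage.append(line[start:end+1])
--
--         line = line[:start] + line[end+1:]
--
--     return line
--
-- def count(line, garbage):
--
--     line = remove(line, garbage)
--     counter = 0
--     final = []
--
--     for letter in line:
--         if letter == "{":
--             counter += 1
--             final.append(counter)
--         elif letter == "}":
--             counter -= 1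
--
--     sum = 0
--
--     for number in final:
--         sum += number
--
--     return sum
-- ===== SOURCE B (Python) =====
-- # One state-machine pass: escape/garbage/depth handled together, no repeated index()+slice rewriting.
-- # Same mutation of `garbage` (appends each stripped "<...>" segment) as A.
-- def count(line, garbage):
--     total = 0
--     depth = 0
--     in_g = False
--     buf = []
--     skip = False
--     for ch in line:
--         if skip:
--             skip = False
--         elif ch == "!":
--             skip = True
--         elif in_g:
--             buf.append(ch)
--             if ch == ">":
--                 garbage.append("".join(buf))
--                 buf = []
--                 in_g = False
--         elif ch == "<":
--             in_g = True
--             buf = ["<"]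
--         elif ch == "{":
--             depth += 1
--             total += depth
--         elif ch == "}":
--             depth -= 1
--     return total
-- ===== Notes on version B (the rewrite author's own statement) =====
-- stated objective: alternative
-- what changed: A repeatedly scans the string with index() and rebuilds it by slicing (once per '!' escape and once per garbage section) and then makes two more counting passes; B makes a single character-by-character state-machine pass that handles '!'-escapes, garbage and nesting depth together.
-- crash fix: On inputs where, after '!'-escape removal, some '<' opens a garbage section that no later '>' closes, A raises ValueError (line.index('>', start) fails); B finishes its single pass and returns the total of the groups counted so far. — e.g. on count("{}<ab", []): A raises ValueError, B returns 1
import Mathlib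
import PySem

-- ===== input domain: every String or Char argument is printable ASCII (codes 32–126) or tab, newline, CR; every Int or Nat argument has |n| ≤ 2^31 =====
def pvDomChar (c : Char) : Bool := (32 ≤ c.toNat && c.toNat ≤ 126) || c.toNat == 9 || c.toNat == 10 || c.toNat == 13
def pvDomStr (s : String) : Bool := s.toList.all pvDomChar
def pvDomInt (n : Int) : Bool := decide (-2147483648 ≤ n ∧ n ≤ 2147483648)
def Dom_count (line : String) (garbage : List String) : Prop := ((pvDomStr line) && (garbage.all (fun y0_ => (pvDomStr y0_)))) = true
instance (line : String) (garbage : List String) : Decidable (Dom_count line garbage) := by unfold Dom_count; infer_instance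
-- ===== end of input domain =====

-- B replaces A's repeated index()+slice rewriting passes by a single state-machine pass over
-- the characters; A mutates `garbage` in place (appends each stripped "<...>" segment) and
-- B performs the same appends — the theorems below are about the RETURN value only.

-- ===== PORT A =====
-- while "!" in line: start = line.index("!"); line = line[:start] + line[start+2:]
-- (index/slice done over the char list; indices from index? are in range and nonnegative, so
--  take/drop is exact for these slices)
def bangLoop (l : List Char) : List Char :=
  match h : PySem.List.index? l '!' with
  | none => l
  | some s => bangLoop (l.take s ++ l.drop (s + 2))
termination_by l.length
decreasing_by
  obtain ⟨hk, -, -⟩ := PySem.List.getElem_of_index?_eq_some h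
  simp only [List.length_append, List.length_take, List.length_drop]
  omega

-- while "<" in line: start = line.index("<"); end = line.index(">", start)  (ValueError → none);
-- garbage.append(line[start:end+1]); line = line[:start] + line[end+1:]
def gLoop (l : List Char) (g : List String) : Option (List Char × List String) :=
  match h : PySem.List.index? l '<' with
  | none => some (l, g)
  | some s =>
    match h2 : PySem.List.index? (l.drop s) '>' with
    | none => none   -- Python raises ValueError here (excluded by Pre_count)
    | some j =>
      gLoop (l.take s ++ l.drop (s + j + 1)) (g ++ [String.ofList ((l.take (s + j + 1)).drop s)])
termination_by l.length
decreasing_by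
  obtain ⟨hk, -, -⟩ := PySem.List.getElem_of_index?_eq_some h
  simp only [List.length_append, List.length_take, List.length_drop]
  omega

-- the two counting for-loops of A's count
def aCount (l : List Char) : Int :=
  let st := l.foldl
    (fun (st : Int × List Int) letter =>
      if letter = '{' then (st.1 + 1, st.2 ++ [st.1 + 1])
      else if letter = '}' then (st.1 - 1, st.2)
      else st) (0, [])
  st.2.foldl (· + ·) 0

def count (line : String) (garbage : List String) : Int :=
  match gLoop (bangLoop line.toList) garbage with
  | none => 0   -- unreachable under Pre_count: Python raises ValueError
  | some (l, _) => aCount l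

-- ===== PORT B =====
structure BSt where
  total : Int
  depth : Int
  inG : Bool
  buf : List Char
  skip : Bool
  gar : List String
deriving Repr

def bStep (st : BSt) (ch : Char) : BSt :=
  if st.skip then { st with skip := false }
  else if ch = '!' then { st with skip := true }
  else if st.inG then
    let buf := st.buf ++ [ch]
    if ch = '>' then { st with buf := [], inG := false, gar := st.gar ++ [String.ofList buf] }
    else { st with buf := buf }
  else if ch = '<' then { st with inG := true, buf := ['<'] }
  else if ch = '{' then { st with depth := st.depth + 1, total := st.total + st.depth + 1 }
  else if ch = '}' then { st with depth := st.depth - 1 }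
  else st

def count_alt (line : String) (garbage : List String) : Int :=
  (line.toList.foldl bStep ⟨0, 0, false, [], false, garbage⟩).total

-- ===== PRECONDITION & SPEC =====
-- one pass of Python's '!'-removal loop: drop each '!' together with the following char
def stripBang : List Char → List Char
  | [] => []
  | [c] => if c = '!' then [] else [c]
  | c :: c2 :: r => if c = '!' then stripBang r else c :: stripBang (c2 :: r)

-- okG g l: scanning l from garbage-state g, every '<'-opened garbage section is closed by a '>'
def okG : Bool → List Char → Bool
  | g, [] => !g
  | false, c :: r => if c = '<' then okG true r else okG false r
  | true, c :: r => if c = '>' then okG false r else okG true r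

-- Pre_count excludes exactly the inputs on which A raises ValueError: after '!'-escape removal
-- some '<' opens a garbage section that no later '>' closes (line.index(">", start) fails).
def Pre_count (line : String) (garbage : List String) : Prop :=
  okG false (stripBang line.toList) = true
instance (line : String) (garbage : List String) : Decidable (Pre_count line garbage) := by
  unfold Pre_count; infer_instance

def pvWitness_count : String × List String := ("{{<a!>b>},{}}", [])

-- A raises ValueError (unclosed garbage section after '!'-removal) exactly where Pre_count fails;
-- B just finishes its single pass and returns the total of the groups closed so far.
def Raises_count (line : String) (garbage : List String) : Prop :=
  okG false (stripBang line.toList) = false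
instance (line : String) (garbage : List String) : Decidable (Raises_count line garbage) := by
  unfold Raises_count; infer_instance
def pvRaiseWitness_count : String × List String := ("{}<ab", [])
def pvRaiseWitnessOut_count : Int := 1

def Spec_count (line : String) (garbage : List String) (out : Int) : Prop := out = count_alt line garbage
instance (line : String) (garbage : List String) (out : Int) : Decidable (Spec_count line garbage out) := by unfold Spec_count; infer_instance

-- ===== CLAIM (what is proved, stated in full; the proofs are below) =====
def Claim_equal_count : Prop := ∀ (line : String) (garbage : List String), Dom_count line garbage → Pre_count line garbage → Spec_count line garbage (count line garbage)

def Claim_raises_count : Prop :=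
  (∀ (line : String) (garbage : List String), Dom_count line garbage → Raises_count line garbage → ¬ Pre_count line garbage) ∧
  (Dom_count (pvRaiseWitness_count.1) (pvRaiseWitness_count.2) ∧ Raises_count (pvRaiseWitness_count.1) (pvRaiseWitness_count.2) ∧ count_alt (pvRaiseWitness_count.1) (pvRaiseWitness_count.2) = pvRaiseWitnessOut_count)

-- ===== LEMMAS AND PROOFS =====

-- garbage filter: what A's '<'-removal loop leaves of a '!'-stripped list
def gFil : Bool → List Char → List Char
  | _, [] => []
  | false, c :: r => if c = '<' then gFil true r else c :: gFil false r
  | true, c :: r => if c = '>' then gFil false r else gFil true r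

-- counting machine: depth/total over the cleaned list
def cPhase : List Char → Int → Int → Int
  | [], _, t => t
  | c :: r, d, t =>
    if c = '{' then cPhase r (d + 1) (t + d + 1)
    else if c = '}' then cPhase r (d - 1) t
    else cPhase r d t

-- garbage-aware counting machine over a '!'-stripped list
def gm : Bool → List Char → Int → Int → Int
  | _, [], _, t => t
  | true, c :: r, d, t => if c = '>' then gm false r d t else gm true r d t
  | false, c :: r, d, t =>
    if c = '<' then gm true r d t
    else if c = '{' then gm false r (d + 1) (t + d + 1)
    else if c = '}' then gm false r (d - 1) t
    else gm false r d t

theorem stripBang_cons_bang (r : List Char) : stripBang ('!' :: r) = stripBang (r.drop 1) := by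
  cases r <;> simp [stripBang]

theorem stripBang_cons_ne (c : Char) (r : List Char) (hc : ¬ c = '!') :
    stripBang (c :: r) = c :: stripBang r := by
  cases r <;> simp [stripBang, hc]

theorem stripBang_not_mem (l : List Char) (h : '!' ∉ l) : stripBang l = l := by
  induction l with
  | nil => simp [stripBang]
  | cons c r ih =>
    simp only [List.mem_cons, not_or] at h
    have hc : ¬ c = '!' := fun hh => h.1 hh.symm
    rw [stripBang_cons_ne c r hc, ih h.2]

theorem stripBang_append (a b : List Char) (h : '!' ∉ a) : stripBang (a ++ b) = a ++ stripBang b := by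
  induction a with
  | nil => simp
  | cons c r ih =>
    simp only [List.mem_cons, not_or] at h
    have hc : ¬ c = '!' := fun hh => h.1 hh.symm
    rw [List.cons_append, stripBang_cons_ne c (r ++ b) hc, ih h.2, List.cons_append]

theorem bangLoop_eq_strip (l : List Char) : bangLoop l = stripBang l := by
  induction hn : l.length using Nat.strong_induction_on generalizing l with
  | _ n IH =>
  rw [bangLoop]
  split
  next h =>
    rw [stripBang_not_mem l ((PySem.List.index?_eq_none_iff _ _).mp h)]
  next s h =>
    obtain ⟨pre, suf, hl, hlen, hnot⟩ := (PySem.List.index?_eq_some_iff _ _ _).mp h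
    subst hl
    subst hlen
    have hdrop : (pre ++ '!' :: suf).drop (pre.length + 2) = suf.drop 1 := by
      simp [List.drop_append]
    rw [List.take_left, hdrop]
    rw [IH (pre ++ suf.drop 1).length
      (by subst hn; simp only [List.length_append, List.length_cons, List.length_drop]; omega) _ rfl]
    rw [stripBang_append _ _ hnot, stripBang_append _ _ hnot, stripBang_cons_bang]

theorem okG_false_append (a b : List Char) (h : '<' ∉ a) : okG false (a ++ b) = okG false b := by
  induction a with
  | nil => simp
  | cons c r ih =>
    simp only [List.mem_cons, not_or] at h
    rw [List.cons_append, okG]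
    have hc : ¬ c = _ := fun hh => h.1 hh.symm
    simp [hc, ih h.2]

theorem okG_true_append (a b : List Char) (h : '>' ∉ a) : okG true (a ++ b) = okG true b := by
  induction a with
  | nil => simp
  | cons c r ih =>
    simp only [List.mem_cons, not_or] at h
    rw [List.cons_append, okG]
    have hc : ¬ c = _ := fun hh => h.1 hh.symm
    simp [hc, ih h.2]

theorem okG_true_not_mem (l : List Char) (h : '>' ∉ l) : okG true l = false := by
  induction l with
  | nil => rfl
  | cons c r ih =>
    simp only [List.mem_cons, not_or] at h
    rw [okG]
    have hc : ¬ c = _ := fun hh => h.1 hh.symm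
    simp [hc, ih h.2]

theorem gFil_not_mem (l : List Char) (h : '<' ∉ l) : gFil false l = l := by
  induction l with
  | nil => rfl
  | cons c r ih =>
    simp only [List.mem_cons, not_or] at h
    rw [gFil]
    have hc : ¬ c = _ := fun hh => h.1 hh.symm
    simp [hc, ih h.2]

theorem gFil_false_append (a b : List Char) (h : '<' ∉ a) : gFil false (a ++ b) = a ++ gFil false b := by
  induction a with
  | nil => simp
  | cons c r ih =>
    simp only [List.mem_cons, not_or] at h
    rw [List.cons_append, gFil]
    have hc : ¬ c = _ := fun hh => h.1 hh.symm
    simp [hc, ih h.2]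

theorem gFil_true_append (a b : List Char) (h : '>' ∉ a) : gFil true (a ++ b) = gFil true b := by
  induction a with
  | nil => simp
  | cons c r ih =>
    simp only [List.mem_cons, not_or] at h
    rw [List.cons_append, gFil]
    have hc : ¬ c = _ := fun hh => h.1 hh.symm
    simp [hc, ih h.2]

theorem gLoop_eq (l : List Char) (g : List String) (hok : okG false l = true) :
    ∃ g', gLoop l g = some (gFil false l, g') := by
  induction hn : l.length using Nat.strong_induction_on generalizing l g with
  | _ n IH =>
  rw [gLoop]
  split
  next h =>
    exact ⟨g, by rw [gFil_not_mem l ((PySem.List.index?_eq_none_iff _ _).mp h)]⟩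
  next s h =>
    obtain ⟨pre, suf, hl, hlen, hnot⟩ := (PySem.List.index?_eq_some_iff _ _ _).mp h
    subst hl
    subst hlen
    rw [List.drop_left]
    split
    next h2 =>
      exfalso
      have hns : '>' ∉ suf := by
        have := (PySem.List.index?_eq_none_iff _ _).mp h2
        simp only [List.mem_cons, not_or] at this
        exact this.2
      rw [okG_false_append _ _ hnot, okG] at hok
      simp [okG_true_not_mem suf hns] at hok
    next j h2 =>
      obtain ⟨pre2, suf2, hl2, hlen2, hnot2⟩ := (PySem.List.index?_eq_some_iff _ _ _).mp h2
      -- pre2 begins with '<' (since '>' ∉ pre2 and the searched list begins with '<')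
      cases pre2 with
      | nil => simp at hl2
      | cons a pre2' =>
        simp only [List.cons_append, List.cons.injEq] at hl2
        obtain ⟨ha, hsuf⟩ := hl2
        subst ha
        simp only [List.mem_cons, not_or] at hnot2
        subst hsuf
        subst hlen2
        have hdrop2 : (pre ++ '<' :: (pre2' ++ '>' :: suf2)).drop
            (pre.length + ('<' :: pre2').length + 1) = suf2 := by
          have hsplit : pre ++ '<' :: (pre2' ++ '>' :: suf2)
              = (pre ++ '<' :: pre2' ++ ['>']) ++ suf2 := by simp
          have hlen3 : pre.length + ('<' :: pre2').length + 1
              = (pre ++ '<' :: pre2' ++ ['>']).length := by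
            simp only [List.length_append, List.length_cons, List.length_nil]
          rw [hsplit, hlen3, List.drop_left]
        rw [List.take_left, hdrop2]
        have hokr : okG false (pre ++ suf2) = true := by
          rw [okG_false_append _ _ hnot] at hok ⊢
          rw [okG] at hok
          simp only [if_pos rfl] at hok
          rw [okG_true_append _ _ hnot2.2, okG] at hok
          simpa using hok
        obtain ⟨g', hg'⟩ := IH (pre ++ suf2).length (by subst hn; simp only [List.length_append, List.length_cons]; omega) (pre ++ suf2)
          (g ++ [String.ofList (((pre ++ '<' :: (pre2' ++ '>' :: suf2)).take
            (pre.length + ('<' :: pre2').length + 1)).drop pre.length)]) hokr rfl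
        refine ⟨g', ?_⟩
        rw [hg']
        have heq : gFil false (pre ++ '<' :: (pre2' ++ '>' :: suf2)) = gFil false (pre ++ suf2) := by
          rw [gFil_false_append _ _ hnot, gFil_false_append _ _ hnot, gFil]
          simp only [if_pos rfl]
          rw [gFil_true_append _ _ hnot2.2, gFil]
          simp
        rw [heq]

theorem cPhase_shift (l : List Char) (d t : Int) : cPhase l d t = t + cPhase l d 0 := by
  induction l generalizing d t with
  | nil => simp [cPhase]
  | cons c r ih =>
    rw [cPhase, cPhase]
    split_ifs with h1 h2
    · rw [ih (d + 1) (t + d + 1), ih (d + 1) (0 + d + 1)]; ring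
    · rw [ih (d - 1) t]
    · rw [ih d t]

theorem aFold_eq (l : List Char) (c : Int) (f : List Int) :
    ((l.foldl (fun (st : Int × List Int) letter =>
      if letter = '{' then (st.1 + 1, st.2 ++ [st.1 + 1])
      else if letter = '}' then (st.1 - 1, st.2)
      else st) (c, f)).2).foldl (· + ·) 0 = f.foldl (· + ·) 0 + cPhase l c 0 := by
  induction l generalizing c f with
  | nil => simp [cPhase]
  | cons x r ih =>
    simp only [List.foldl_cons]
    rw [cPhase]
    split_ifs with h1 h2
    · rw [ih (c + 1) (f ++ [c + 1]), List.foldl_append, cPhase_shift r (c + 1) (0 + c + 1)]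
      simp only [List.foldl_cons, List.foldl_nil]
      ring
    · simp [h1, h2, ih (c - 1) f]
    · simp [h1, h2, ih c f]

theorem aCount_eq (l : List Char) : aCount l = cPhase l 0 0 := by
  unfold aCount
  simpa using aFold_eq l 0 []

theorem gm_eq_cPhase (l : List Char) (d t : Int) :
    gm false l d t = cPhase (gFil false l) d t ∧ gm true l d t = cPhase (gFil true l) d t := by
  induction l generalizing d t with
  | nil => simp [gm, gFil, cPhase]
  | cons c r ih =>
    constructor
    · rw [gm, gFil]
      split_ifs with h1 h2 h3
      · exact (ih d t).2
      · rw [cPhase, if_pos h2]; exact (ih (d + 1) (t + d + 1)).1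
      · rw [cPhase, if_neg h2, if_pos h3]; exact (ih (d - 1) t).1
      · rw [cPhase, if_neg h2, if_neg h3]
        have : ¬ c = '{' := h2
        exact (ih d t).1
    · rw [gm, gFil]
      split_ifs with h1
      · exact (ih d t).1
      · exact (ih d t).2

theorem foldB_total (l : List Char) : ∀ (d t : Int) (inG : Bool) (buf : List Char)
    (gar : List String) (skip : Bool),
    (l.foldl bStep ⟨t, d, inG, buf, skip, gar⟩).total
      = gm inG (stripBang (if skip then l.drop 1 else l)) d t := by
  induction l with
  | nil => intro d t inG buf gar skip; cases skip <;> simp [gm, stripBang] <;> cases inG <;> rfl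
  | cons c r ih =>
    intro d t inG buf gar skip
    cases skip with
    | true =>
      simp only [List.foldl_cons, bStep, if_pos rfl, List.drop_succ_cons, List.drop_zero]
      simpa using ih d t inG buf gar false
    | false =>
      simp only [List.foldl_cons, if_neg (by simp : ¬False), List.drop_zero]
      by_cases hc : c = '!'
      · subst hc
        rw [show bStep ⟨t, d, inG, buf, false, gar⟩ '!' = ⟨t, d, inG, buf, true, gar⟩ by
          simp [bStep]]
        rw [ih d t inG buf gar true]
        simp [stripBang_cons_bang]
      · have hstrip : stripBang (c :: r) = c :: stripBang r := stripBang_cons_ne c r hc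
        rw [if_neg (by simp : ¬(false = true)), hstrip]
        cases inG with
        | true =>
          by_cases hgt : c = '>'
          · subst hgt
            rw [show bStep ⟨t, d, true, buf, false, gar⟩ '>' =
              ⟨t, d, false, [], false, gar ++ [String.ofList (buf ++ ['>'])]⟩ by simp [bStep]]
            rw [ih d t false [] (gar ++ [String.ofList (buf ++ ['>'])]) false]
            rw [gm]; simp
          · rw [show bStep ⟨t, d, true, buf, false, gar⟩ c =
              ⟨t, d, true, buf ++ [c], false, gar⟩ by simp [bStep, hc, hgt]]
            rw [ih d t true (buf ++ [c]) gar false]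
            rw [gm]; simp [hgt]
        | false =>
          by_cases hlt : c = '<'
          · subst hlt
            rw [show bStep ⟨t, d, false, buf, false, gar⟩ '<' =
              ⟨t, d, true, ['<'], false, gar⟩ by simp [bStep]]
            rw [ih d t true ['<'] gar false]
            rw [gm]; simp
          · by_cases hob : c = '{'
            · subst hob
              rw [show bStep ⟨t, d, false, buf, false, gar⟩ '{' =
                ⟨t + d + 1, d + 1, false, buf, false, gar⟩ by simp [bStep]]
              rw [ih (d + 1) (t + d + 1) false buf gar false]
              rw [gm]; simp
            · by_cases hcb : c = '}'
              · subst hcb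
                rw [show bStep ⟨t, d, false, buf, false, gar⟩ '}' =
                  ⟨t, d - 1, false, buf, false, gar⟩ by simp [bStep]]
                rw [ih (d - 1) t false buf gar false]
                rw [gm]; simp
              · rw [show bStep ⟨t, d, false, buf, false, gar⟩ c =
                  ⟨t, d, false, buf, false, gar⟩ by simp [bStep, hc, hlt, hob, hcb]]
                rw [ih d t false buf gar false]
                rw [gm]; simp [hlt, hob, hcb]

-- ===== VERDICT (by name: the statement is the Claim_ definition above) =====
theorem count_spec : Claim_equal_count := by
  intro line garbage _ hpre
  unfold Spec_count count count_alt
  rw [bangLoop_eq_strip]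
  obtain ⟨g', hg⟩ := gLoop_eq (stripBang line.toList) garbage hpre
  rw [hg]
  show aCount (gFil false (stripBang line.toList)) = _
  rw [aCount_eq, foldB_total line.toList 0 0 false [] garbage false]
  simp only [Bool.false_eq_true, if_false]
  exact ((gm_eq_cPhase (stripBang line.toList) 0 0).1).symm

@[simp] theorem count_raises : Claim_raises_count := by
  unfold Claim_raises_count
  constructor
  · intro line garbage _ hr hp
    unfold Raises_count at hr
    unfold Pre_count at hp
    rw [hp] at hr
    exact absurd hr (by decide)
  · exact ⟨by decide, by decide, by decide⟩
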